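-- pv_equiv track=rewrite | github.com/Zeydel/Everybody-Codes | The Kingdom of Algorithmia/Quest20/Quest20_part2.py | get_loop_alt
-- ===== SOURCE A (Python) =====
-- def get_loop_alt(nodes, hot_winds, cold_winds):
--
--     alt = 0
--
--     for node in nodes:
--
--         x, y, _ = node
--
--         if (x, y) in hot_winds:
--             alt += 1
--         elif (x, y) in cold_winds:
--             alt -= 2
--         else:
--             alt -= 1
--
--     return alt
-- ===== SOURCE B (Python) =====
-- def get_loop_alt(nodes, hot_winds, cold_winds):
--     hot = set(hot_winds)
--     cold_only = {p for p in cold_winds if p not in hot}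
--     pts = [(x, y) for x, y, _ in nodes]
--     h = sum(p in hot for p in pts)
--     c = sum(p in cold_only for p in pts)
--     return 2 * h - c - len(pts)
-- ===== Notes on version B (the rewrite author's own statement) =====
-- stated objective: alternative
-- what changed: B replaces A's single branching loop by staged branch-free passes: it precomputes a cold-minus-hot set, projects nodes to (x,y) points once, counts hot and cold-only memberships in two separate counting passes, and combines them with the closed form 2*h - c - len(nodes).
import Mathlib
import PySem

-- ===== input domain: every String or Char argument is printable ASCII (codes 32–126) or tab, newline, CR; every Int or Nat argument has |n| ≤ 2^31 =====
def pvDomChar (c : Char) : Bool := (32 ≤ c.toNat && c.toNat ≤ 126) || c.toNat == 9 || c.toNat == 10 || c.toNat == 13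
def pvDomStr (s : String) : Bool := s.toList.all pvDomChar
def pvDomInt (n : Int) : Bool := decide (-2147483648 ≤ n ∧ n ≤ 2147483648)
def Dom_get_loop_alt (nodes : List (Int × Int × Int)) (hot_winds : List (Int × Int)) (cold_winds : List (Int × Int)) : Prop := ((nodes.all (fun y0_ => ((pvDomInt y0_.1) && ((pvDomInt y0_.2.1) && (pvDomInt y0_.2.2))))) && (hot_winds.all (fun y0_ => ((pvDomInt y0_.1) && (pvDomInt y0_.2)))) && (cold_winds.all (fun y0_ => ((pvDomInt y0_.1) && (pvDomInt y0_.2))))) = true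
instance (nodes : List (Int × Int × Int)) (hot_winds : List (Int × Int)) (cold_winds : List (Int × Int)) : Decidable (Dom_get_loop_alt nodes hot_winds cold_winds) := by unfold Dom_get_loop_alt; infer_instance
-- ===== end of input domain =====

-- B replaces A's branching +1/-2/-1 loop by staged branch-free passes: a cold-minus-hot set,
-- a projected point list, two membership counts h and c, and the closed form 2*h - c - len(nodes).

-- ===== PORT A =====
-- for node in nodes: x,y,_ = node; if (x,y) in hot_winds: alt += 1 elif (x,y) in cold_winds: alt -= 2 else: alt -= 1
def get_loop_alt (nodes : List (Int × Int × Int)) (hot_winds : List (Int × Int)) (cold_winds : List (Int × Int)) : Int :=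
  nodes.foldl (fun alt node =>
    let x := node.1
    let y := node.2.1
    if hot_winds.contains (x, y) then alt + 1
    else if cold_winds.contains (x, y) then alt - 2
    else alt - 1) 0

-- ===== PORT B =====
-- hot = set(hot_winds); cold_only = {p for p in cold_winds if p not in hot};
-- pts = [(x,y) for x,y,_ in nodes]; h = sum(p in hot ...); c = sum(p in cold_only ...); 2*h - c - len(pts)
def get_loop_alt_alt (nodes : List (Int × Int × Int)) (hot_winds : List (Int × Int)) (cold_winds : List (Int × Int)) : Int :=
  let hot : PySem.Set (Int × Int) := PySem.Set.ofList hot_winds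
  let cold_only : PySem.Set (Int × Int) :=
    PySem.Set.ofList (cold_winds.filter (fun p => !(PySem.Set.contains hot p)))
  let pts := nodes.map (fun n => (n.1, n.2.1))
  let h : Int := (pts.countP (fun p => PySem.Set.contains hot p) : Int)
  let c : Int := (pts.countP (fun p => PySem.Set.contains cold_only p) : Int)
  2 * h - c - (pts.length : Int)

-- ===== PRECONDITION & SPEC =====
def Spec_get_loop_alt (nodes : List (Int × Int × Int)) (hot_winds : List (Int × Int)) (cold_winds : List (Int × Int)) (out : Int) : Prop := out = get_loop_alt_alt nodes hot_winds cold_winds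
instance (nodes : List (Int × Int × Int)) (hot_winds : List (Int × Int)) (cold_winds : List (Int × Int)) (out : Int) : Decidable (Spec_get_loop_alt nodes hot_winds cold_winds out) := by unfold Spec_get_loop_alt; infer_instance

-- ===== CLAIM (what is proved, stated in full; the proofs are below) =====
def Claim_equal_get_loop_alt : Prop := ∀ (nodes : List (Int × Int × Int)) (hot_winds : List (Int × Int)) (cold_winds : List (Int × Int)), Dom_get_loop_alt nodes hot_winds cold_winds → Spec_get_loop_alt nodes hot_winds cold_winds (get_loop_alt nodes hot_winds cold_winds)

-- ===== LEMMAS AND PROOFS =====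

theorem pv_contains_ofList {α : Type} [BEq α] [LawfulBEq α] (l : List α) (x : α) :
    PySem.Set.contains (PySem.Set.ofList l) x = l.contains x := by
  by_cases hx : x ∈ l
  · simp [PySem.Set.contains, hx, ((PySem.Set.mem_ofList l x).mpr hx)]
  · have h2 : x ∉ PySem.Set.ofList l := fun hm => hx ((PySem.Set.mem_ofList l x).mp hm)
    simp [PySem.Set.contains, hx, h2]

-- A's branching accumulation equals 2*(count of p) - (count of q-but-not-p) - length
theorem pv_loop_counts (p q : (Int × Int × Int) → Bool) :
    ∀ (nodes : List (Int × Int × Int)) (alt : Int),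
      nodes.foldl (fun alt node =>
        if p node then alt + 1 else if q node then alt - 2 else alt - 1) alt
      = alt + 2 * (nodes.countP p : Int)
          - (nodes.countP (fun n => !(p n) && q n) : Int)
          - (nodes.length : Int) := by
  intro nodes
  induction nodes with
  | nil => intro alt; simp
  | cons nd tl ih =>
    intro alt
    simp only [List.foldl_cons, List.length_cons, List.countP_cons]
    by_cases hp : p nd
    · simp only [hp, if_true, Bool.not_true, Bool.false_and]
      rw [ih (alt + 1)]
      push_cast; ring
    · simp only [hp, Bool.false_eq_true, if_false, Bool.not_false, Bool.true_and]
      by_cases hq : q nd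
      · simp only [hq, if_true]
        rw [ih (alt - 2)]
        push_cast; ring
      · simp only [hq, Bool.false_eq_true, if_false]
        rw [ih (alt - 1)]
        push_cast; ring

-- membership in the cold-minus-hot set, as a Boolean identity on the source lists
theorem pv_cold_only_contains (hot_winds cold_winds : List (Int × Int)) (x : Int × Int) :
    (cold_winds.filter (fun p => !(hot_winds.contains p))).contains x
    = (!(hot_winds.contains x) && cold_winds.contains x) := by
  simp [List.mem_filter, Bool.and_comm]

-- ===== VERDICT (by name: the statement is the Claim_ definition above) =====
theorem get_loop_alt_spec : Claim_equal_get_loop_alt := by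
  intro nodes hot cold _
  show get_loop_alt nodes hot cold = get_loop_alt_alt nodes hot cold
  simp only [get_loop_alt, get_loop_alt_alt, List.countP_map, List.length_map,
    Function.comp_def, pv_contains_ofList, pv_cold_only_contains]
  rw [pv_loop_counts (fun n => hot.contains (n.1, n.2.1)) (fun n => cold.contains (n.1, n.2.1)) nodes 0]
  ring
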